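-- pv_equiv track=rewrite | github.com/jasonheldman-creator/Waves-Simple | helpers/price_loader.py | deduplicate_tickers
-- ===== SOURCE A (Python) =====
-- from typing import List, Optional, Dict, Tuple, Any
--
-- def normalize_ticker(ticker: str) -> str:
--     """
--     Normalize ticker symbols to match yfinance conventions.
--
--     Examples:
--         BRK.B -> BRK-B
--         BF.B -> BF-B
--         stETH-USD -> stETH-USD (already normalized)
--
--     Args:
--         ticker: Raw ticker symbol
--
--     Returns:
--         Normalized ticker symbol
--     """
--     if not ticker:
--         return ticker
--
--     # Replace dots with hyphens for class shares (e.g., BRK.B -> BRK-B)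
--     normalized = ticker.replace('.', '-')
--
--     return normalized.strip().upper()
--
-- def deduplicate_tickers(tickers: List[str]) -> List[str]:
--     """
--     Deduplicate and normalize ticker list.
--
--     Args:
--         tickers: List of ticker symbols (may contain duplicates)
--
--     Returns:
--         Sorted list of unique, normalized ticker symbols
--     """
--     if not tickers:
--         return []
--
--     # Normalize and deduplicate
--     normalized = set()
--     for ticker in tickers:
--         if ticker and ticker.strip():
--             normalized.add(normalize_ticker(ticker))
--
--     return sorted(list(normalized))
-- ===== SOURCE B (Python) =====
-- from typing import List
--
-- def normalize_ticker(ticker: str) -> str: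
--     if not ticker:
--         return ticker
--     normalized = ticker.replace('.', '-')
--     return normalized.strip().upper()
--
-- def _dedup_adjacent(xs):
--     # adjacency dedup of a sorted list, recursing past the run of equal heads
--     if not xs:
--         return []
--     head = xs[0]
--     i = 1
--     while i < len(xs) and xs[i] == head:
--         i += 1
--     return [head] + _dedup_adjacent(xs[i:])
--
-- def deduplicate_tickers(tickers: List[str]) -> List[str]:
--     norm = sorted(normalize_ticker(t) for t in tickers if t and t.strip())
--     return _dedup_adjacent(norm)
-- ===== Notes on version B (the rewrite author's own statement) =====
-- stated objective: alternative
-- what changed: Replaces A's hash-set accumulation followed by sorting with a filter/map pass, a sort, and an adjacency-based deduplication scan over the sorted list (no set at all).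
import Mathlib
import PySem

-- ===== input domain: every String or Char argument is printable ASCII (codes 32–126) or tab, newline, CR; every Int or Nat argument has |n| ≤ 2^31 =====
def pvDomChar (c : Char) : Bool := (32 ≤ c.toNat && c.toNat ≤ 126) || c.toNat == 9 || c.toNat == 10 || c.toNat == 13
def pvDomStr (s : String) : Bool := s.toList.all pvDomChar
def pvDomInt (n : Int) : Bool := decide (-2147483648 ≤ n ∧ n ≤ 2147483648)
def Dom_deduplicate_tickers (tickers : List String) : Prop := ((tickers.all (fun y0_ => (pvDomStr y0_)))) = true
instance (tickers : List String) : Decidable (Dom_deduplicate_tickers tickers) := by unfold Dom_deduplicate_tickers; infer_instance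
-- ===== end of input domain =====

-- B replaces A's hash-set accumulation with filter/map → sort → adjacency dedup (objective: alternative, same result).

-- ===== PORT A =====
-- shared module helper (used verbatim by both Pythons)
def normalize_ticker (ticker : String) : String :=
  if ticker = "" then ticker
  else
    let normalized := PySem.Str.replace ticker "." "-"
    PySem.Str.upper (PySem.Str.strip normalized)

def deduplicate_tickers (tickers : List String) : List String :=
  if tickers = [] then []
  else
    let normalized :=
      tickers.foldl (fun s ticker =>
        if ticker ≠ "" ∧ PySem.Str.strip ticker ≠ "" then PySem.Set.add s (normalize_ticker ticker) else s)
        PySem.Set.empty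
    PySem.List.sorted normalized (fun x => x) false

-- ===== PORT B =====
-- adjacency dedup of a sorted list: keep the head, recurse past the run of equal heads
def dedupAdjacent : List String → List String
  | [] => []
  | x :: xs => x :: dedupAdjacent (xs.dropWhile (fun y => y == x))
termination_by xs => xs.length
decreasing_by
  simp only [List.length_cons]
  exact Nat.lt_succ_of_le (List.length_dropWhile_le _ _)

def deduplicate_tickers_alt (tickers : List String) : List String :=
  dedupAdjacent
    (PySem.List.sorted
      ((tickers.filter (fun t => decide (t ≠ "" ∧ PySem.Str.strip t ≠ ""))).map normalize_ticker)
      (fun x => x) false)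

-- ===== PRECONDITION & SPEC =====
def Spec_deduplicate_tickers (tickers : List String) (out : List String) : Prop := out = deduplicate_tickers_alt tickers
instance (tickers : List String) (out : List String) : Decidable (Spec_deduplicate_tickers tickers out) := by unfold Spec_deduplicate_tickers; infer_instance

-- ===== CLAIM (what is proved, stated in full; the proofs are below) =====
def Claim_equal_deduplicate_tickers : Prop := ∀ (tickers : List String), Dom_deduplicate_tickers tickers → Spec_deduplicate_tickers tickers (deduplicate_tickers tickers)

-- ===== LEMMAS AND PROOFS =====

-- A's filtered loop over a set accumulator is Set.update with the filtered-and-mapped list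
lemma foldl_add_filter (l : List String) (s : PySem.Set String) :
    l.foldl (fun s ticker =>
        if ticker ≠ "" ∧ PySem.Str.strip ticker ≠ "" then PySem.Set.add s (normalize_ticker ticker) else s) s
      = PySem.Set.update s ((l.filter (fun t => decide (t ≠ "" ∧ PySem.Str.strip t ≠ ""))).map normalize_ticker) := by
  induction l generalizing s with
  | nil => rfl
  | cons x xs ih =>
      by_cases hx : x ≠ "" ∧ PySem.Str.strip x ≠ ""
      · simp [List.foldl_cons, hx, ih, PySem.Set.update]
      · simp [List.foldl_cons, hx, ih, PySem.Set.update]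

lemma mem_dedupAdjacent (xs : List String) (y : String) : y ∈ dedupAdjacent xs ↔ y ∈ xs := by
  induction xs using dedupAdjacent.induct with
  | case1 => simp [dedupAdjacent]
  | case2 x xs ih =>
      rw [dedupAdjacent]
      constructor
      · intro h
        rcases List.mem_cons.mp h with h | h
        · simp [h]
        · exact List.mem_cons_of_mem _ ((xs.dropWhile_sublist (fun y => y == x)).mem (ih.mp h))
      · intro h
        rcases List.mem_cons.mp h with h | h
        · simp [h]
        · rcases List.mem_append.mp ((List.takeWhile_append_dropWhile (p := fun y => y == x) (l := xs)) ▸ h) with h | h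
          · have := List.mem_takeWhile_imp h
            simp_all
          · exact List.mem_cons_of_mem _ (ih.mpr h)

lemma pairwise_dedupAdjacent (xs : List String) (h : xs.Pairwise (· ≤ ·)) :
    (dedupAdjacent xs).Pairwise (· < ·) := by
  induction xs using dedupAdjacent.induct with
  | case1 => simp [dedupAdjacent]
  | case2 x xs ih =>
      rw [dedupAdjacent]
      rcases List.pairwise_cons.mp h with ⟨hx, hxs⟩
      have hd : (xs.dropWhile (fun y => y == x)).Pairwise (· ≤ ·) :=
        hxs.sublist (xs.dropWhile_sublist (fun y => y == x))
      refine List.pairwise_cons.mpr ⟨?_, ih hd⟩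
      intro y hy
      have hyd : y ∈ xs.dropWhile (fun y => y == x) := (mem_dedupAdjacent _ _).mp hy
      -- the head of the drop-while residue is ≠ x and ≥ x, hence > x; later elements dominate it
      cases hdw : xs.dropWhile (fun y => y == x) with
      | nil => simp [hdw] at hyd
      | cons h0 t =>
          have hh0 : (fun y => y == x) h0 = false := by
            have := List.head?_dropWhile_not (fun y => y == x) xs
            rw [hdw] at this
            simpa using this
          have hh0x : h0 ≠ x := by simpa using hh0
          have hh0mem : h0 ∈ xs := (xs.dropWhile_sublist (fun y => y == x)).mem (by simp [hdw])
          have hxh0 : x < h0 := lt_of_le_of_ne (hx _ hh0mem) (Ne.symm hh0x)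
          rw [hdw] at hyd
          rcases List.mem_cons.mp hyd with rfl | hyt
          · exact hxh0
          · have hpair := List.pairwise_cons.mp (hdw ▸ hd)
            exact lt_of_lt_of_le hxh0 (hpair.1 _ hyt)

lemma dedupAdjacent_sorted_eq (m : List String) :
    dedupAdjacent (PySem.List.sorted m (fun x => x) false)
      = PySem.List.sorted (PySem.Set.ofList m) (fun x => x) false := by
  have hps : (PySem.List.sorted m (fun x => x) false).Pairwise (· ≤ ·) := by
    simpa using PySem.List.sorted_pairwise m (fun x => x)
  have hL : (dedupAdjacent (PySem.List.sorted m (fun x => x) false)).Pairwise (· < ·) :=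
    pairwise_dedupAdjacent _ hps
  have hR : (PySem.List.sorted (PySem.Set.ofList m) (fun x => x) false).Pairwise (· < ·) :=
    PySem.List.sorted_ofList_pairwise_lt m
  have hmem : ∀ y, y ∈ dedupAdjacent (PySem.List.sorted m (fun x => x) false)
      ↔ y ∈ PySem.List.sorted (PySem.Set.ofList m) (fun x => x) false := by
    intro y
    rw [mem_dedupAdjacent, PySem.List.mem_sorted, PySem.List.mem_sorted, PySem.Set.mem_ofList]
  have hperm := (List.perm_ext_iff_of_nodup hL.nodup hR.nodup).mpr hmem
  exact hperm.eq_of_pairwise (fun a b _ _ h1 h2 => absurd h2 (lt_asymm h1)) hL hR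

-- ===== VERDICT (by name: the statement is the Claim_ definition above) =====
theorem deduplicate_tickers_spec : Claim_equal_deduplicate_tickers := by
  intro tickers _
  show deduplicate_tickers tickers = deduplicate_tickers_alt tickers
  by_cases h : tickers = []
  · subst h; simp [deduplicate_tickers, deduplicate_tickers_alt, dedupAdjacent, PySem.List.sorted]
  · rw [deduplicate_tickers, if_neg h, deduplicate_tickers_alt]
    show PySem.List.sorted
        (tickers.foldl (fun s ticker =>
          if ticker ≠ "" ∧ PySem.Str.strip ticker ≠ "" then PySem.Set.add s (normalize_ticker ticker) else s)
          PySem.Set.empty) (fun x => x) false = _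
    rw [foldl_add_filter, PySem.Set.update_empty, ← dedupAdjacent_sorted_eq]
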